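-- pv_equiv track=rewrite | github.com/SharryXu/python-workout | part1/ex4/ex4.py | hex_output
-- ===== SOURCE A (Python) =====
-- def hex_output(a):
--     raw = str(a)
--     result = 0
--     index = 0
--     for c in raw[-1 : -len(raw) - 1 : -1]:
--         result += int(c) * pow(16, index)
--         index += 1
--     return result
-- ===== SOURCE B (Python) =====
-- def hex_output(a):
--     result = 0
--     for c in str(a):
--         result = result * 16 + int(c)
--     return result
-- ===== Notes on version B (the rewrite author's own statement) =====
-- stated objective: simpler
-- what changed: Replaces the reversed-slice loop that sums int(c)*pow(16,index) per position with a forward Horner accumulator result = result*16 + int(c), dropping the slice, the index counter and the pow calls.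
import Mathlib
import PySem

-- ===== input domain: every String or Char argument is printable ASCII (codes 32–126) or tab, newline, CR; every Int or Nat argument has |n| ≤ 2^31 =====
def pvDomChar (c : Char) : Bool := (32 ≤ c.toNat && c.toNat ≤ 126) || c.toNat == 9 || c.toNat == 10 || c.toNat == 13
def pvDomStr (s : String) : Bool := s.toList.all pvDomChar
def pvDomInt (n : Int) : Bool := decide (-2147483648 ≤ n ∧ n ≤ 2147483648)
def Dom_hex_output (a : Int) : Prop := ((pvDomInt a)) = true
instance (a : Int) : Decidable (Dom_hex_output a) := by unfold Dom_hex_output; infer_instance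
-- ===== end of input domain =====

-- B replaces the reversed slice plus per-digit pow(16, index) with a forward Horner
-- accumulator (result = result*16 + int(c)); same value on every nonnegative input.

-- ===== PORT A =====
-- raw[-1 : -len(raw)-1 : -1], then result += int(c) * 16^index; int(c) via
-- PySem.Int.ofChars? (none = ValueError, excluded by Pre_, defaulted to 0 here).
def hex_output (a : Int) : Int :=
  let raw := PySem.Int.toChars a
  let rev := (PySem.List.slice? raw (some (-1)) (some (-(raw.length : Int) - 1)) (-1)).getD []
  (rev.foldl (fun (p : Int × Nat) c =>
      (p.1 + ((PySem.Int.ofChars? [c]).getD 0) * 16 ^ p.2, p.2 + 1)) ((0 : Int), (0 : Nat))).1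

-- ===== PORT B =====
def hex_output_alt (a : Int) : Int :=
  (PySem.Int.toChars a).foldl
    (fun result c => result * 16 + (PySem.Int.ofChars? [c]).getD 0) 0

-- ===== PRECONDITION & SPEC =====
-- A raises ValueError on int('-') when a < 0 (B likewise), so Pre_ admits 0 ≤ a.
def Pre_hex_output (a : Int) : Prop := 0 ≤ a
instance (a : Int) : Decidable (Pre_hex_output a) := by unfold Pre_hex_output; infer_instance
def pvWitness_hex_output : Int := (123)
def Spec_hex_output (a : Int) (out : Int) : Prop := out = hex_output_alt a
instance (a : Int) (out : Int) : Decidable (Spec_hex_output a out) := by unfold Spec_hex_output; infer_instance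

-- ===== CLAIM (what is proved, stated in full; the proofs are below) =====
def Claim_equal_hex_output : Prop := ∀ (a : Int), Dom_hex_output a → Pre_hex_output a → Spec_hex_output a (hex_output a)

-- ===== LEMMAS AND PROOFS =====

/-- digit value of one character, as both ports compute it -/
def pvDig (c : Char) : Int := (PySem.Int.ofChars? [c]).getD 0

/-- value of a digit list, least-significant digit first -/
def pvValRev : List Char → Int
  | [] => 0
  | c :: t => pvDig c + 16 * pvValRev t

lemma pv_sliceIndices_rev (n : Nat) :
    PySem.List.sliceIndices n (some (-1)) (some (-(n : Int) - 1)) (-1) =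
    PySem.List.sliceIndices n none none (-1) := by
  simp only [PySem.List.sliceIndices]
  norm_num
  omega

lemma pv_slice_rev {α : Type} (xs : List α) :
    PySem.List.slice? xs (some (-1)) (some (-(xs.length : Int) - 1)) (-1) = some xs.reverse := by
  rw [show PySem.List.slice? xs (some (-1)) (some (-(xs.length : Int) - 1)) (-1) =
      PySem.List.slice? xs none none (-1) from by
    simp only [PySem.List.slice?, pv_sliceIndices_rev]]
  exact PySem.List.slice?_none_none_neg_one xs

lemma pv_foldA (l : List Char) (s : Int) (i : Nat) :
    (l.foldl (fun (p : Int × Nat) c =>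
        (p.1 + pvDig c * 16 ^ p.2, p.2 + 1)) (s, i)).1 = s + 16 ^ i * pvValRev l := by
  induction l generalizing s i with
  | nil => simp [pvValRev]
  | cons c t ih =>
      simp only [List.foldl_cons, pvValRev, ih]
      ring

lemma pv_valRev_append (xs : List Char) (c : Char) :
    pvValRev (xs ++ [c]) = pvValRev xs + pvDig c * 16 ^ xs.length := by
  induction xs with
  | nil => simp [pvValRev]
  | cons d t ih =>
      simp only [List.cons_append, pvValRev, ih, List.length_cons]
      ring

lemma pv_foldB (l : List Char) (acc : Int) :
    l.foldl (fun result c => result * 16 + pvDig c) acc =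
      acc * 16 ^ l.length + pvValRev l.reverse := by
  induction l generalizing acc with
  | nil => simp [pvValRev]
  | cons c t ih =>
      simp only [List.foldl_cons, ih, List.reverse_cons, pv_valRev_append,
        List.length_reverse, List.length_cons]
      ring

-- ===== VERDICT (by name: the statement is the Claim_ definition above) =====
theorem hex_output_spec : Claim_equal_hex_output := by
  intro a _ _
  show hex_output a = hex_output_alt a
  unfold hex_output hex_output_alt
  simp only [pv_slice_rev, Option.getD_some]
  rw [show (fun (p : Int × Nat) c =>
        (p.1 + ((PySem.Int.ofChars? [c]).getD 0) * 16 ^ p.2, p.2 + 1)) =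
      (fun (p : Int × Nat) c => (p.1 + pvDig c * 16 ^ p.2, p.2 + 1)) from rfl,
    show (fun (result : Int) c => result * 16 + (PySem.Int.ofChars? [c]).getD 0) =
      (fun (result : Int) c => result * 16 + pvDig c) from rfl]
  rw [pv_foldA, pv_foldB]
  simp
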